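-- pv_equiv track=rewrite | github.com/MisticVoid/SPACEBATTLE | Sectors.py | getCoords
-- ===== SOURCE A (Python) =====
-- SECTOR_SIZE = 500
--
-- def scale(x):
--     return int(x/SECTOR_SIZE)
--
-- def getCoords(points):
--     xl = xr = points[0][0]
--     yd = yu = points[0][1]
--     for x,y in points:
--         xl = min(xl, x)
--         xr = max(xr, x)
--         yd = max(yd, y)
--         yu = min(yu, y)
--
--     return [(x, y) for x in range(scale(xl), scale(xr) + 1) for y in range(scale(yu), scale(yd) + 1)]
-- ===== SOURCE B (Python) =====
-- SECTOR_SIZE = 500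
--
-- def scale(x):
--     return int(x/SECTOR_SIZE)
--
-- def getCoords(points):
--     # scale() is monotone, so the grid bounding box can be computed on the
--     # already-scaled coordinates; sorting and taking the endpoints gives
--     # the extrema without a running-accumulator scan.
--     gxs = sorted(scale(x) for x, _ in points)
--     gys = sorted(scale(y) for _, y in points)
--     return [(x, y)
--             for x in range(gxs[0], gxs[-1] + 1)
--             for y in range(gys[0], gys[-1] + 1)]
-- ===== Notes on version B (the rewrite author's own statement) =====
-- stated objective: alternative
-- what changed: B scales each coordinate to its grid cell first (scale is monotone, so extrema commute with it) and finds the grid bounding box by sorting the scaled coordinates and taking the endpoint elements, instead of A's single four-accumulator min/max scan over raw coordinates.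
import Mathlib
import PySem

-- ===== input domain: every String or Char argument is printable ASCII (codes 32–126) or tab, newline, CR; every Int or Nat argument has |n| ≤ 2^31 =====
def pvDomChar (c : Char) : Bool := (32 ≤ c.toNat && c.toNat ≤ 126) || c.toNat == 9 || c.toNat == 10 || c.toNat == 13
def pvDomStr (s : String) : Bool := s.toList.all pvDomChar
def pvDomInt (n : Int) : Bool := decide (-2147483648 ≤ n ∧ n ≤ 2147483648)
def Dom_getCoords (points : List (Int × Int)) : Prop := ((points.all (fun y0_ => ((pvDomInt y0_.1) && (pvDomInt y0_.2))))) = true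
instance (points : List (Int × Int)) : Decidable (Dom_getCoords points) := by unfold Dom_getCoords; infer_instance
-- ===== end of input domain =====

-- ===== PORT A =====
-- B scales each coordinate to its grid cell first and reads the grid bounding box off
-- sorted scaled coordinates (endpoints), instead of A's four-accumulator extrema scan
-- over raw coordinates (objective: alternative; return values only, neither mutates its argument).
-- scale(x) = int(x/500): Python truncates toward zero; exact for |x| ≤ 2^31 (Dom), where the float quotient rounds to the truncated integer
def pyScale (x : Int) : Int := x.tdiv 500

def getCoords (points : List (Int × Int)) : List (Int × Int) :=
  match points with
  | [] => []  -- Python raises IndexError here; excluded by Pre_getCoords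
  | p :: _ =>
    let st := points.foldl
      (fun (s : Int × Int × Int × Int) (q : Int × Int) =>
        (min s.1 q.1, max s.2.1 q.1, max s.2.2.1 q.2, min s.2.2.2 q.2))
      (p.1, p.1, p.2, p.2)
    (PySem.List.pyRange (pyScale st.1) (pyScale st.2.1 + 1) 1).flatMap
      (fun x => (PySem.List.pyRange (pyScale st.2.2.2) (pyScale st.2.2.1 + 1) 1).map
        (fun y => (x, y)))

-- ===== PORT B =====
def getCoords_alt (points : List (Int × Int)) : List (Int × Int) :=
  let gxs := PySem.List.sorted (points.map (fun q => pyScale q.1)) (fun v => v) false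
  let gys := PySem.List.sorted (points.map (fun q => pyScale q.2)) (fun v => v) false
  match PySem.List.pyGet? gxs 0, PySem.List.pyGet? gxs (-1),
        PySem.List.pyGet? gys 0, PySem.List.pyGet? gys (-1) with
  | some x0, some x1, some y0, some y1 =>
      (PySem.List.pyRange x0 (x1 + 1) 1).flatMap
        (fun x => (PySem.List.pyRange y0 (y1 + 1) 1).map (fun y => (x, y)))
  | _, _, _, _ => []  -- Python gxs[0] raises IndexError on the empty list; excluded by Pre_getCoords

-- ===== PRECONDITION & SPEC =====
-- A indexes points[0]: it raises IndexError on the empty list, so Pre_ requires a nonempty list.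
def Pre_getCoords (points : List (Int × Int)) : Prop := points ≠ []
instance (points : List (Int × Int)) : Decidable (Pre_getCoords points) := by unfold Pre_getCoords; infer_instance
def pvWitness_getCoords : (List (Int × Int)) := [(-700, 120), (300, -40)]
def Spec_getCoords (points : List (Int × Int)) (out : List (Int × Int)) : Prop := out = getCoords_alt points
instance (points : List (Int × Int)) (out : List (Int × Int)) : Decidable (Spec_getCoords points out) := by unfold Spec_getCoords; infer_instance

-- ===== CLAIM (what is proved, stated in full; the proofs are below) =====
def Claim_equal_getCoords : Prop := ∀ (points : List (Int × Int)), Dom_getCoords points → Pre_getCoords points → Spec_getCoords points (getCoords points)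

-- ===== LEMMAS AND PROOFS =====
-- truncating division by the positive constant 500 is monotone
theorem pyScale_mono {a b : Int} (h : a ≤ b) : pyScale a ≤ pyScale b := by
  unfold pyScale
  rw [Int.tdiv_eq_ediv, Int.tdiv_eq_ediv]
  have := Int.ediv_le_ediv (by norm_num : (0:Int) < 500) h
  simp only [Int.dvd_iff_emod_eq_zero, show (500:Int).sign = 1 from rfl] at *
  split_ifs <;> omega

theorem pyScale_min (a b : Int) : pyScale (min a b) = min (pyScale a) (pyScale b) := by
  rcases le_total a b with h | h
  · simp [min_eq_left h, min_eq_left (pyScale_mono h)]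
  · simp [min_eq_right h, min_eq_right (pyScale_mono h)]

theorem pyScale_max (a b : Int) : pyScale (max a b) = max (pyScale a) (pyScale b) := by
  rcases le_total a b with h | h
  · simp [max_eq_right h, max_eq_right (pyScale_mono h)]
  · simp [max_eq_left h, max_eq_left (pyScale_mono h)]

-- scaling commutes with the running-min / running-max folds
theorem foldl_min_map (l : List Int) (a : Int) :
    (l.map pyScale).foldl min (pyScale a) = pyScale (l.foldl min a) := by
  induction l generalizing a with
  | nil => rfl
  | cons x t ih => simp [← pyScale_min, ih]

theorem foldl_max_map (l : List Int) (a : Int) :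
    (l.map pyScale).foldl max (pyScale a) = pyScale (l.foldl max a) := by
  induction l generalizing a with
  | nil => rfl
  | cons x t ih => simp [← pyScale_max, ih]

-- A's four-accumulator fold computes the component-wise extrema folds over the projections
theorem pvFold4 (l : List (Int × Int)) (a b c d : Int) :
    l.foldl
      (fun (s : Int × Int × Int × Int) (q : Int × Int) =>
        (min s.1 q.1, max s.2.1 q.1, max s.2.2.1 q.2, min s.2.2.2 q.2))
      (a, b, c, d)
    = ((l.map (fun q => q.1)).foldl min a, (l.map (fun q => q.1)).foldl max b,
       (l.map (fun q => q.2)).foldl max c, (l.map (fun q => q.2)).foldl min d) := by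
  induction l generalizing a b c d with
  | nil => simp
  | cons q t ih => simp [ih]

-- the first element of a sorted nonempty Int list is the running-min of the list
theorem sorted_head (x : Int) (t : List Int) :
    (PySem.List.sorted (x :: t) (fun v => v) false).head? = some (t.foldl min x) := by
  rcases hs : PySem.List.sorted (x :: t) (fun v => v) false with _ | ⟨m, r⟩
  · exact absurd ((PySem.List.sorted_eq_nil_iff _ _ _).1 hs) (by simp)
  · have hmin := PySem.List.min?_id_cons x t
    have hmem : t.foldl min x ∈ x :: t := PySem.List.min?_mem hmin
    have hmm : m ∈ x :: t := (PySem.List.mem_sorted _ _ _ m).1 (hs ▸ List.mem_cons_self ..)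
    have h1 := PySem.List.key_head_sorted_le (x :: t) (fun v => v) hs (t.foldl min x) hmem
    have h2 := PySem.List.min?_isMin hmin m hmm
    simp only [List.head?_cons, Option.some.injEq]
    simp only at h1 h2
    omega

-- the last element of a sorted nonempty Int list is the running-max of the list
theorem sorted_last (x : Int) (t : List Int) :
    (PySem.List.sorted (x :: t) (fun v => v) false).getLast? = some (t.foldl max x) := by
  set s := PySem.List.sorted (x :: t) (fun v => v) false with hs
  have hne : s ≠ [] := by rw [hs, ne_eq, PySem.List.sorted_eq_nil_iff]; simp
  have hlen : 0 < s.length := List.length_pos_iff.2 hne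
  have hmax := PySem.List.max?_id_cons x t
  have hmem : t.foldl max x ∈ x :: t := PySem.List.max?_mem hmax
  obtain ⟨i, hi, hie⟩ := List.mem_iff_getElem.1
    ((PySem.List.mem_sorted (x :: t) (fun v => v) false (t.foldl max x)).2 hmem)
  have hlast_mem : s[s.length - 1]'(by omega) ∈ x :: t :=
    (PySem.List.mem_sorted (x :: t) (fun v => v) false _).1 (List.getElem_mem _)
  have hil : i < s.length := by rw [hs]; exact hi
  have h1 := PySem.List.key_sorted_getElem_mono (x :: t) (fun v => v)
    (p := i) (q := s.length - 1) (by omega) (by rw [← hs]; omega)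
  have h2 := PySem.List.max?_isMax hmax _ hlast_mem
  rw [List.getLast?_eq_getElem?, List.getElem?_eq_getElem (by omega)]
  simp only [Option.some.injEq]
  simp only at h1 h2
  exact le_antisymm h2 (hie ▸ h1)

-- ===== VERDICT (by name: the statement is the Claim_ definition above) =====
theorem getCoords_spec : Claim_equal_getCoords := by
  intro points _ hpre
  unfold Spec_getCoords getCoords getCoords_alt
  match points with
  | [] => exact absurd rfl hpre
  | p :: t =>
    simp only [List.foldl_cons, min_self, max_self, pvFold4, List.map_cons]
    have hx : (p :: t).map (fun q => pyScale q.1) = pyScale p.1 :: t.map (fun q => pyScale q.1) := rfl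
    have hy : (p :: t).map (fun q => pyScale q.2) = pyScale p.2 :: t.map (fun q => pyScale q.2) := rfl
    have hmx : t.map (fun q => pyScale q.1) = (t.map (fun q => q.1)).map pyScale := by
      simp [List.map_map, Function.comp]
    have hmy : t.map (fun q => pyScale q.2) = (t.map (fun q => q.2)).map pyScale := by
      simp [List.map_map, Function.comp]
    rw [hx, hy, hmx, hmy] at *
    have hhx := sorted_head (pyScale p.1) ((t.map (fun q => q.1)).map pyScale)
    have hlx := sorted_last (pyScale p.1) ((t.map (fun q => q.1)).map pyScale)
    have hhy := sorted_head (pyScale p.2) ((t.map (fun q => q.2)).map pyScale)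
    have hly := sorted_last (pyScale p.2) ((t.map (fun q => q.2)).map pyScale)
    simp only [foldl_min_map, foldl_max_map] at hhx hlx hhy hly
    simp only [PySem.List.pyGet?_zero, PySem.List.pyGet?_neg_one,
      ← List.head?_eq_getElem?, hhx, hlx, hhy, hly]
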